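-- pv_equiv track=rewrite | github.com/AndreaSalati/project_final | utils.py | split_vector_into_subsets
-- ===== SOURCE A (Python) =====
-- def split_vector_into_subsets(vector, num_subsets):
--     avg = len(vector) // num_subsets
--     remainder = len(vector) % num_subsets
--     subsets = []
--     i = 0
--     for _ in range(num_subsets):
--         subset_size = avg + (1 if remainder > 0 else 0)
--         subset = vector[i : i + subset_size]
--         subsets.append(subset)
--         i += subset_size
--         remainder -= 1
--     return subsets
-- ===== SOURCE B (Python) =====
-- def split_vector_into_subsets(vector, num_subsets):
--     avg, rem = divmod(len(vector), num_subsets)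
--     def start(k):
--         return k * avg + min(k, rem)
--     return [vector[start(k):start(k + 1)] for k in range(num_subsets)]
-- ===== Notes on version B (the rewrite author's own statement) =====
-- stated objective: simpler
-- what changed: Replaces the mutable running index i and the decremented remainder with a closed-form boundary formula start(k)=k*avg+min(k,rem) and builds the slices by a comprehension over k.
import Mathlib
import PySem

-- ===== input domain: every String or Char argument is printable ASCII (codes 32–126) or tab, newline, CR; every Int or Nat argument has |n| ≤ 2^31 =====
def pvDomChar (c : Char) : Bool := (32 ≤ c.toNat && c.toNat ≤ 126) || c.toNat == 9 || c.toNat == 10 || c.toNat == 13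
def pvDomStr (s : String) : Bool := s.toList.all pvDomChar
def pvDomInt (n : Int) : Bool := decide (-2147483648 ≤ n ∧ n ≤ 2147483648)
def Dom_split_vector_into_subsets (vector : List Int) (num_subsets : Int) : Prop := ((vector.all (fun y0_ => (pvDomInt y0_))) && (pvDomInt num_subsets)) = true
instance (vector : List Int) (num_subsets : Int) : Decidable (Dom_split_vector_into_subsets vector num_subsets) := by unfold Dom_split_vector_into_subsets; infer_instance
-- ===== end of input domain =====

-- B replaces A's mutable running index and decremented remainder by the closed-form
-- boundary formula start(k) = k*avg + min(k, rem) and a comprehension over k (objective: simpler).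

-- ===== PORT A =====
def split_vector_into_subsets (vector : List Int) (num_subsets : Int) : List (List Int) :=
  let avg := PySem.Int.floordiv vector.length num_subsets
  let remainder := PySem.Int.mod vector.length num_subsets
  let st := (PySem.List.pyRange 0 num_subsets 1).foldl
    (fun (st : List (List Int) × Int × Int) _ =>
      let subset_size := avg + (if st.2.2 > 0 then (1 : Int) else 0)
      (st.1 ++ [PySem.List.slice vector (some st.2.1) (some (st.2.1 + subset_size))],
       st.2.1 + subset_size, st.2.2 - 1))
    ([], 0, remainder)
  st.1

-- ===== PORT B =====
def split_vector_into_subsets_alt (vector : List Int) (num_subsets : Int) : List (List Int) :=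
  let avg := PySem.Int.floordiv vector.length num_subsets
  let rem := PySem.Int.mod vector.length num_subsets
  let start := fun (k : Int) => k * avg + min k rem
  (PySem.List.pyRange 0 num_subsets 1).map
    (fun k => PySem.List.slice vector (some (start k)) (some (start (k + 1))))

-- ===== PRECONDITION & SPEC =====
-- Pre_ excludes exactly num_subsets = 0, where Python A raises ZeroDivisionError.
def Pre_split_vector_into_subsets (vector : List Int) (num_subsets : Int) : Prop := num_subsets ≠ 0
instance (vector : List Int) (num_subsets : Int) : Decidable (Pre_split_vector_into_subsets vector num_subsets) := by unfold Pre_split_vector_into_subsets; infer_instance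
def pvWitness_split_vector_into_subsets : List Int × Int := ([1, 2, 3, 4, 5], 3)

def Spec_split_vector_into_subsets (vector : List Int) (num_subsets : Int) (out : List (List Int)) : Prop := out = split_vector_into_subsets_alt vector num_subsets
instance (vector : List Int) (num_subsets : Int) (out : List (List Int)) : Decidable (Spec_split_vector_into_subsets vector num_subsets out) := by unfold Spec_split_vector_into_subsets; infer_instance

-- ===== CLAIM (what is proved, stated in full; the proofs are below) =====
def Claim_equal_split_vector_into_subsets : Prop := ∀ (vector : List Int) (num_subsets : Int), Dom_split_vector_into_subsets vector num_subsets → Pre_split_vector_into_subsets vector num_subsets → Spec_split_vector_into_subsets vector num_subsets (split_vector_into_subsets vector num_subsets)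

-- ===== LEMMAS AND PROOFS =====

-- Loop invariant: after j iterations A's state is (first j slices, start j, rem0 - j),
-- where start j = j*avg + min j rem0; the remaining iterations append the slices at
-- positions j, j+1, … given by the closed-form boundaries.
theorem loop_eq (vector : List Int) (avg rem0 : Int) :
    ∀ (ks : List Int) (j : Int), 0 ≤ j → ∀ (acc : List (List Int)),
      (ks.foldl
        (fun (st : List (List Int) × Int × Int) _ =>
          let subset_size := avg + (if st.2.2 > 0 then (1 : Int) else 0)
          (st.1 ++ [PySem.List.slice vector (some st.2.1) (some (st.2.1 + subset_size))],
           st.2.1 + subset_size, st.2.2 - 1))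
        (acc, j * avg + min j rem0, rem0 - j)).1
      = acc ++ (List.range ks.length).map
          (fun (t : Nat) => PySem.List.slice vector
            (some ((j + (t : Int)) * avg + min (j + (t : Int)) rem0))
            (some ((j + (t : Int) + 1) * avg + min (j + (t : Int) + 1) rem0))) := by
  intro ks
  induction ks with
  | nil => intro j hj acc; simp
  | cons k ks ih =>
    intro j hj acc
    have hstep : j * avg + min j rem0 + (avg + (if rem0 - j > 0 then (1 : Int) else 0))
        = (j + 1) * avg + min (j + 1) rem0 := by
      split_ifs with h
      · have h1 : min j rem0 = j := by omega
        have h2 : min (j + 1) rem0 = j + 1 := by omega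
        rw [h1, h2]; ring
      · have h1 : min j rem0 = rem0 := by omega
        have h2 : min (j + 1) rem0 = rem0 := by omega
        rw [h1, h2]; ring
    simp only [List.foldl_cons]
    have := ih (j + 1) (by omega) (acc ++ [PySem.List.slice vector (some (j * avg + min j rem0))
      (some ((j + 1) * avg + min (j + 1) rem0))])
    rw [hstep, show rem0 - j - 1 = rem0 - (j + 1) from by ring, this]
    rw [List.length_cons, List.range_succ_eq_map, List.map_cons, List.map_map]
    simp only [List.append_assoc, List.cons_append, List.nil_append, Nat.cast_zero, add_zero]
    rw [← hstep]
    congr 1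
    congr 1
    apply List.map_congr_left
    intro t _
    simp only [Function.comp_apply]
    push_cast
    ring_nf

theorem mod_nonneg_of_pos (a b : Int) (hb : 0 < b) : 0 ≤ PySem.Int.mod a b := by
  rw [PySem.Int.mod_eq_emod_of_pos hb]
  exact Int.emod_nonneg a (by omega)

-- ===== VERDICT (by name: the statement is the Claim_ definition above) =====
theorem split_vector_into_subsets_spec : Claim_equal_split_vector_into_subsets := by
  intro vector num_subsets _ _
  unfold Spec_split_vector_into_subsets split_vector_into_subsets split_vector_into_subsets_alt
  dsimp only
  by_cases hn : 0 < num_subsets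
  · have hrem : 0 ≤ PySem.Int.mod vector.length num_subsets :=
      mod_nonneg_of_pos _ _ hn
    have h := loop_eq vector (PySem.Int.floordiv vector.length num_subsets)
      (PySem.Int.mod vector.length num_subsets)
      (PySem.List.pyRange 0 num_subsets 1) 0 le_rfl []
    simp only [zero_mul, zero_add, min_eq_left hrem, sub_zero] at h
    rw [h]
    simp only [List.nil_append, PySem.List.pyRange_one,
      List.map_map, sub_zero, List.length_map, List.length_range]
    apply List.map_congr_left
    intro t _
    simp only [Function.comp_apply, zero_add]
  · rw [PySem.List.pyRange_one_eq_nil (by omega)]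
    simp
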